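-- pv_equiv track=rewrite | github.com/HugoAlder/m1s1 | act/tp3/part1.py | check_dispo
-- ===== SOURCE A (Python) =====
-- def check_dispo(dep, fin):
--     if (len(dep) != len(fin)):
--         return False
--     l = len(dep)
--     for x in range (0, l):
--         for x2 in range(0, l):
--             if (x != x2):
--                 if (dep[x] >= dep[x2] and dep[x] < fin[x2]):
--                     return False
--                 if (fin[x] > dep[x2] and fin[x] <= fin[x2]):
--                     return False
--     return True
-- ===== SOURCE B (Python) =====
-- def _bl(s, v):
--     # first index whose element is >= v in sorted list s
--     lo, hi = 0, len(s)
--     while lo < hi: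
--         mid = (lo + hi) // 2
--         if s[mid] < v:
--             lo = mid + 1
--         else:
--             hi = mid
--     return lo
--
--
-- def _br(s, v):
--     # first index whose element is > v in sorted list s
--     lo, hi = 0, len(s)
--     while lo < hi:
--         mid = (lo + hi) // 2
--         if s[mid] <= v:
--             lo = mid + 1
--         else:
--             hi = mid
--     return lo
--
--
-- def check_dispo(dep, fin):
--     if len(dep) != len(fin):
--         return False
--     sd = sorted(dep)
--     sf = sorted(fin)
--     for a, b in zip(dep, fin):
--         own = 1 if a < b else 0
--         # other intervals' starts falling in [a, b), ends falling in (a, b]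
--         cd = _bl(sd, b) - _bl(sd, a) - own
--         cf = _br(sf, b) - _br(sf, a) - own
--         if cd > 0 or cf > 0:
--             return False
--     return True
-- ===== Notes on version B (the rewrite author's own statement) =====
-- stated objective: faster
-- what changed: Replaces the all-pairs double loop by sorting the start and end lists once and, for each interval, counting foreign starts in [a,b) and foreign ends in (a,b] with two binary searches.
import Mathlib
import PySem

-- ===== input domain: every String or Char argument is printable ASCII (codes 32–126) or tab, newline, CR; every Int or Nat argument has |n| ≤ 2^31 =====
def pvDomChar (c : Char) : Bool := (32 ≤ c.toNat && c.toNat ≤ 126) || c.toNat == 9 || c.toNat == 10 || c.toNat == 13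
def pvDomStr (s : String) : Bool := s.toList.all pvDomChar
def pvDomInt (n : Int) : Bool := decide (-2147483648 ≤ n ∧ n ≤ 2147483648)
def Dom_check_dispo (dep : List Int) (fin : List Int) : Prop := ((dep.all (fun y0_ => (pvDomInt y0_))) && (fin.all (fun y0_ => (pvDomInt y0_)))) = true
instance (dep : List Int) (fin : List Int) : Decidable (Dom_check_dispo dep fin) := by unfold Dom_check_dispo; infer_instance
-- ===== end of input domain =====

-- B replaces A's all-pairs double loop by sorting once plus per-interval binary searches; proved to return the same Bool on every input.


-- ===== PORT A =====
-- the two range(0, l) loops with early 'return False' become nested List.any over List.range;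
-- indices drawn from range(0, l) are always in bounds, so dep[x] is ported as dep.getD x 0
def check_dispo (dep : List Int) (fin : List Int) : Bool :=
  if dep.length ≠ fin.length then false
  else
    let l := dep.length
    !((List.range l).any (fun x => (List.range l).any (fun x2 =>
      x ≠ x2 &&
      ((decide (dep.getD x 0 ≥ dep.getD x2 0) && decide (dep.getD x 0 < fin.getD x2 0)) ||
       (decide (fin.getD x 0 > dep.getD x2 0) && decide (fin.getD x 0 ≤ fin.getD x2 0))))))

-- ===== PORT B =====
-- port of Source B's hand-written binary searches _bl / _br (s[mid] is always in bounds: mid < hi ≤ len s)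
def pvBlGo (s : List Int) (v : Int) (lo hi : Nat) : Nat :=
  if _h : lo < hi then
    if s.getD ((lo + hi) / 2) 0 < v then pvBlGo s v ((lo + hi) / 2 + 1) hi
    else pvBlGo s v lo ((lo + hi) / 2)
  else lo
termination_by hi - lo
decreasing_by all_goals omega

def pvBrGo (s : List Int) (v : Int) (lo hi : Nat) : Nat :=
  if _h : lo < hi then
    if s.getD ((lo + hi) / 2) 0 ≤ v then pvBrGo s v ((lo + hi) / 2 + 1) hi
    else pvBrGo s v lo ((lo + hi) / 2)
  else lo
termination_by hi - lo
decreasing_by all_goals omega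

def pvBl (s : List Int) (v : Int) : Nat := pvBlGo s v 0 s.length
def pvBr (s : List Int) (v : Int) : Nat := pvBrGo s v 0 s.length

def check_dispo_alt (dep : List Int) (fin : List Int) : Bool :=
  if dep.length ≠ fin.length then false
  else
    let sd := PySem.List.sorted dep (fun x => x) false
    let sf := PySem.List.sorted fin (fun x => x) false
    (List.zip dep fin).all (fun ab =>
      let a := ab.1
      let b := ab.2
      let own : Int := if a < b then 1 else 0
      let cd : Int := (pvBl sd b : Int) - (pvBl sd a : Int) - own
      let cf : Int := (pvBr sf b : Int) - (pvBr sf a : Int) - own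
      !(decide (cd > 0) || decide (cf > 0)))

-- ===== PRECONDITION & SPEC =====
def Spec_check_dispo (dep : List Int) (fin : List Int) (out : Bool) : Prop := out = check_dispo_alt dep fin
instance (dep : List Int) (fin : List Int) (out : Bool) : Decidable (Spec_check_dispo dep fin out) := by unfold Spec_check_dispo; infer_instance

-- ===== CLAIM (what is proved, stated in full; the proofs are below) =====
def Claim_equal_check_dispo : Prop := ∀ (dep : List Int) (fin : List Int), Dom_check_dispo dep fin → Spec_check_dispo dep fin (check_dispo dep fin)

-- ===== LEMMAS AND PROOFS =====

-- "an endpoint of interval i lies inside interval j": the condition both programs test, pair by pair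
def pvE (dep fin : List Int) (i j : Nat) : Prop :=
  (dep.getD j 0 ≤ dep.getD i 0 ∧ dep.getD i 0 < fin.getD j 0) ∨
  (dep.getD j 0 < fin.getD i 0 ∧ fin.getD i 0 ≤ fin.getD j 0)

theorem pvGetD_mono (s : List Int) (hs : s.Pairwise (· ≤ ·)) {i j : Nat} (hij : i ≤ j)
    (hj : j < s.length) : s.getD i 0 ≤ s.getD j 0 := by
  rcases Nat.eq_or_lt_of_le hij with rfl | h
  · exact le_refl _
  · rw [List.getD_eq_getElem s 0 (Nat.lt_trans h hj), List.getD_eq_getElem s 0 hj]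
    exact List.pairwise_iff_getElem.mp hs i j (Nat.lt_trans h hj) hj h

theorem pvBlGo_spec (s : List Int) (v : Int) (hs : s.Pairwise (· ≤ ·)) :
    ∀ n lo hi, hi - lo ≤ n → hi ≤ s.length → lo ≤ hi →
      (∀ i, i < lo → s.getD i 0 < v) → (∀ i, hi ≤ i → i < s.length → v ≤ s.getD i 0) →
      (pvBlGo s v lo hi ≤ s.length ∧ (∀ i, i < pvBlGo s v lo hi → s.getD i 0 < v) ∧
       (∀ i, pvBlGo s v lo hi ≤ i → i < s.length → v ≤ s.getD i 0)) := by
  intro n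
  induction n with
  | zero =>
    intro lo hi hn hhi hlo h1 h2
    rw [pvBlGo, dif_neg (by omega)]
    exact ⟨by omega, h1, fun i hi1 hi2 => h2 i (by omega) hi2⟩
  | succ n ih =>
    intro lo hi hn hhi hlo h1 h2
    rw [pvBlGo]
    by_cases h : lo < hi
    · rw [dif_pos h]
      have hmlen : (lo + hi) / 2 < s.length := by omega
      by_cases hc : s.getD ((lo + hi) / 2) 0 < v
      · rw [if_pos hc]
        refine ih ((lo + hi) / 2 + 1) hi (by omega) hhi (by omega) ?_ h2
        intro i hi1
        have := pvGetD_mono s hs (show i ≤ (lo + hi) / 2 by omega) hmlen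
        omega
      · rw [if_neg hc]
        refine ih lo ((lo + hi) / 2) (by omega) (by omega) (by omega) h1 ?_
        intro i hi1 hi2
        have := pvGetD_mono s hs hi1 hi2
        omega
    · rw [dif_neg h]
      exact ⟨by omega, h1, fun i hi1 hi2 => h2 i (by omega) hi2⟩

theorem pvBrGo_spec (s : List Int) (v : Int) (hs : s.Pairwise (· ≤ ·)) :
    ∀ n lo hi, hi - lo ≤ n → hi ≤ s.length → lo ≤ hi →
      (∀ i, i < lo → s.getD i 0 ≤ v) → (∀ i, hi ≤ i → i < s.length → v < s.getD i 0) →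
      (pvBrGo s v lo hi ≤ s.length ∧ (∀ i, i < pvBrGo s v lo hi → s.getD i 0 ≤ v) ∧
       (∀ i, pvBrGo s v lo hi ≤ i → i < s.length → v < s.getD i 0)) := by
  intro n
  induction n with
  | zero =>
    intro lo hi hn hhi hlo h1 h2
    rw [pvBrGo, dif_neg (by omega)]
    exact ⟨by omega, h1, fun i hi1 hi2 => h2 i (by omega) hi2⟩
  | succ n ih =>
    intro lo hi hn hhi hlo h1 h2
    rw [pvBrGo]
    by_cases h : lo < hi
    · rw [dif_pos h]
      have hmlen : (lo + hi) / 2 < s.length := by omega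
      by_cases hc : s.getD ((lo + hi) / 2) 0 ≤ v
      · rw [if_pos hc]
        refine ih ((lo + hi) / 2 + 1) hi (by omega) hhi (by omega) ?_ h2
        intro i hi1
        have := pvGetD_mono s hs (show i ≤ (lo + hi) / 2 by omega) hmlen
        omega
      · rw [if_neg hc]
        refine ih lo ((lo + hi) / 2) (by omega) (by omega) (by omega) h1 ?_
        intro i hi1 hi2
        have := pvGetD_mono s hs hi1 hi2
        omega
    · rw [dif_neg h]
      exact ⟨by omega, h1, fun i hi1 hi2 => h2 i (by omega) hi2⟩

theorem pvCountP_split (s : List Int) (p : Int → Bool) (r : Nat) (hr : r ≤ s.length)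
    (h1 : ∀ i, i < r → p (s.getD i 0) = true)
    (h2 : ∀ i, r ≤ i → i < s.length → p (s.getD i 0) = false) :
    s.countP p = r := by
  conv_lhs => rw [← List.take_append_drop r s]
  rw [List.countP_append]
  have ht : (s.take r).countP p = (s.take r).length := by
    rw [List.countP_eq_length]
    intro a ha
    obtain ⟨i, hi, hEq⟩ := List.getElem_of_mem ha
    have hir : i < r := by have := hi; simp only [List.length_take] at this; omega
    have hil : i < s.length := by omega
    rw [← hEq, List.getElem_take, ← List.getD_eq_getElem s 0 hil]
    exact h1 i hir
  have hd : (s.drop r).countP p = 0 := by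
    rw [List.countP_eq_zero]
    intro a ha
    obtain ⟨i, hi, hEq⟩ := List.getElem_of_mem ha
    have hil : r + i < s.length := by have := hi; simp only [List.length_drop] at this; omega
    have hh := h2 (r + i) (by omega) hil
    rw [List.getD_eq_getElem s 0 hil] at hh
    rw [← hEq, List.getElem_drop, hh]
    simp
  rw [ht, hd, List.length_take]
  omega

theorem pvBl_eq_countP (s : List Int) (v : Int) (hs : s.Pairwise (· ≤ ·)) :
    pvBl s v = s.countP (fun d => decide (d < v)) := by
  obtain ⟨hle, hA, hB⟩ := pvBlGo_spec s v hs s.length 0 s.length (by omega) le_rfl (by omega)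
    (fun i hi => absurd hi (Nat.not_lt_zero i)) (fun i hi1 hi2 => absurd hi2 (by omega))
  refine (pvCountP_split s _ (pvBl s v) hle ?_ ?_).symm
  · intro i hi
    simpa using hA i hi
  · intro i hi1 hi2
    simpa using hB i hi1 hi2

theorem pvBr_eq_countP (s : List Int) (v : Int) (hs : s.Pairwise (· ≤ ·)) :
    pvBr s v = s.countP (fun d => decide (d ≤ v)) := by
  obtain ⟨hle, hA, hB⟩ := pvBrGo_spec s v hs s.length 0 s.length (by omega) le_rfl (by omega)
    (fun i hi => absurd hi (Nat.not_lt_zero i)) (fun i hi1 hi2 => absurd hi2 (by omega))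
  refine (pvCountP_split s _ (pvBr s v) hle ?_ ?_).symm
  · intro i hi
    simpa using hA i hi
  · intro i hi1 hi2
    simpa using hB i hi1 hi2

theorem pvCountP_lt_split (L : List Int) (a b : Int) (hab : a ≤ b) :
    L.countP (fun d => decide (d < b)) =
      L.countP (fun d => decide (d < a)) + L.countP (fun d => decide (a ≤ d ∧ d < b)) := by
  induction L with
  | nil => simp
  | cons x t ih =>
    simp only [List.countP_cons, ih, decide_eq_true_eq]
    split_ifs <;> omega

theorem pvCountP_le_split (L : List Int) (a b : Int) (hab : a ≤ b) :
    L.countP (fun d => decide (d ≤ b)) =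
      L.countP (fun d => decide (d ≤ a)) + L.countP (fun d => decide (a < d ∧ d ≤ b)) := by
  induction L with
  | nil => simp
  | cons x t ih =>
    simp only [List.countP_cons, ih, decide_eq_true_eq]
    split_ifs <;> omega

theorem pvCountP_pos_take (L : List Int) (p : Int → Bool) (j : Nat) (hj : j ≤ L.length) :
    0 < (L.take j).countP p ↔ ∃ i, i < j ∧ p (L.getD i 0) = true := by
  rw [List.countP_pos_iff]
  constructor
  · rintro ⟨a, ha, hpa⟩
    obtain ⟨i, hi, hEq⟩ := List.getElem_of_mem ha
    have hir : i < j := by have := hi; simp only [List.length_take] at this; omega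
    have hil : i < L.length := by omega
    refine ⟨i, hir, ?_⟩
    rw [List.getD_eq_getElem L 0 hil]
    rw [← hEq, List.getElem_take] at hpa
    exact hpa
  · rintro ⟨i, hir, hp⟩
    have hil : i < L.length := by omega
    have hit : i < (L.take j).length := by simp [List.length_take]; omega
    refine ⟨(L.take j)[i], List.getElem_mem hit, ?_⟩
    rw [List.getElem_take, ← List.getD_eq_getElem L 0 hil]
    exact hp

theorem pvCountP_pos_drop (L : List Int) (p : Int → Bool) (j : Nat) :
    0 < (L.drop (j + 1)).countP p ↔ ∃ i, j < i ∧ i < L.length ∧ p (L.getD i 0) = true := by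
  rw [List.countP_pos_iff]
  constructor
  · rintro ⟨a, ha, hpa⟩
    obtain ⟨i, hi, hEq⟩ := List.getElem_of_mem ha
    have hil : j + 1 + i < L.length := by have := hi; simp only [List.length_drop] at this; omega
    refine ⟨j + 1 + i, by omega, hil, ?_⟩
    rw [List.getD_eq_getElem L 0 hil]
    rw [← hEq, List.getElem_drop] at hpa
    exact hpa
  · rintro ⟨i, hji, hil, hp⟩
    have hit : i - (j + 1) < (L.drop (j + 1)).length := by simp [List.length_drop]; omega
    refine ⟨(L.drop (j + 1))[i - (j + 1)], List.getElem_mem hit, ?_⟩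
    have hEq2 : (L.drop (j + 1))[i - (j + 1)]'hit = L[i]'hil := by
      rw [List.getElem_drop]
      congr 1
      omega
    rw [hEq2, ← List.getD_eq_getElem L 0 hil]
    exact hp

theorem pvTwo_le_countP_iff (L : List Int) (p : Int → Bool) (j : Nat) (hj : j < L.length)
    (hpj : p (L.getD j 0) = true) :
    2 ≤ L.countP p ↔ ∃ i, i < L.length ∧ i ≠ j ∧ p (L.getD i 0) = true := by
  have hdecomp : L.countP p = (L.take j).countP p + 1 + (L.drop (j + 1)).countP p := by
    conv_lhs => rw [← List.take_append_drop j L]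
    rw [List.countP_append, List.drop_eq_getElem_cons hj, List.countP_cons]
    rw [← List.getD_eq_getElem L 0 hj, hpj]
    simp
    omega
  rw [hdecomp]
  have ht := pvCountP_pos_take L p j (by omega)
  have hd := pvCountP_pos_drop L p j
  constructor
  · intro h
    rcases (show 0 < (L.take j).countP p ∨ 0 < (L.drop (j + 1)).countP p by omega) with hc | hc
    · obtain ⟨i, hir, hp⟩ := ht.mp hc
      exact ⟨i, by omega, by omega, hp⟩
    · obtain ⟨i, hji, hil, hp⟩ := hd.mp hc
      exact ⟨i, hil, by omega, hp⟩
  · rintro ⟨i, hil, hne, hp⟩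
    rcases Nat.lt_or_ge i j with hlt | hge
    · have := ht.mpr ⟨i, hlt, hp⟩
      omega
    · have hgt : j < i := by omega
      have := hd.mpr ⟨i, hgt, hil, hp⟩
      omega

-- cd ≤ 0 at interval j  ↔  no OTHER interval's start lies in [a, b)
theorem pvCd_iff (dep : List Int) (j : Nat) (hj : j < dep.length) (b : Int) :
    ((pvBl (PySem.List.sorted dep (fun x => x) false) b : Int) -
      (pvBl (PySem.List.sorted dep (fun x => x) false) (dep.getD j 0) : Int) -
      (if dep.getD j 0 < b then (1 : Int) else 0) ≤ 0) ↔
    ¬ ∃ i, i < dep.length ∧ i ≠ j ∧ (dep.getD j 0 ≤ dep.getD i 0 ∧ dep.getD i 0 < b) := by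
  set a := dep.getD j 0 with ha
  have hsort : (PySem.List.sorted dep (fun x => x) false).Pairwise (· ≤ ·) :=
    PySem.List.sorted_pairwise dep (fun x => x)
  have hperm : (PySem.List.sorted dep (fun x => x) false).Perm dep :=
    PySem.List.sorted_perm dep (fun x => x) false
  have hbl : ∀ v, pvBl (PySem.List.sorted dep (fun x => x) false) v
      = dep.countP (fun d => decide (d < v)) := fun v =>
    (pvBl_eq_countP _ v hsort).trans (hperm.countP_eq _)
  by_cases hab : a < b
  · rw [if_pos hab, hbl, hbl,
      pvCountP_lt_split dep a b (le_of_lt hab)]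
    have hpj : (fun d => decide (a ≤ d ∧ d < b)) (dep.getD j 0) = true := by
      simp only [← ha, decide_eq_true_eq]
      exact ⟨le_refl a, hab⟩
    rw [show ((((dep.countP (fun d => decide (d < a)) + dep.countP (fun d => decide (a ≤ d ∧ d < b)) : Nat) : Int) -
        (dep.countP (fun d => decide (d < a)) : Int) - 1 ≤ 0)) ↔
        ¬ (2 ≤ dep.countP (fun d => decide (a ≤ d ∧ d < b))) from by push_cast; omega]
    rw [pvTwo_le_countP_iff dep _ j hj hpj]
    simp only [decide_eq_true_eq]
  · rw [if_neg hab]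
    have hmono : dep.countP (fun d => decide (d < b)) ≤ dep.countP (fun d => decide (d < a)) := by
      refine List.countP_mono_left ?_
      intro x _ hx
      simp only [decide_eq_true_eq] at hx ⊢
      omega
    refine iff_of_true ?_ ?_
    · rw [hbl, hbl]; omega
    · rintro ⟨i, _, _, h1, h2⟩; omega

-- cf ≤ 0 at interval j  ↔  no OTHER interval's end lies in (a, b]
theorem pvCf_iff (dep fin : List Int) (j : Nat) (hlen : dep.length = fin.length)
    (hj : j < dep.length) :
    ((pvBr (PySem.List.sorted fin (fun x => x) false) (fin.getD j 0) : Int) -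
      (pvBr (PySem.List.sorted fin (fun x => x) false) (dep.getD j 0) : Int) -
      (if dep.getD j 0 < fin.getD j 0 then (1 : Int) else 0) ≤ 0) ↔
    ¬ ∃ i, i < dep.length ∧ i ≠ j ∧ (dep.getD j 0 < fin.getD i 0 ∧ fin.getD i 0 ≤ fin.getD j 0) := by
  set a := dep.getD j 0 with ha
  set b := fin.getD j 0 with hb
  have hsort : (PySem.List.sorted fin (fun x => x) false).Pairwise (· ≤ ·) :=
    PySem.List.sorted_pairwise fin (fun x => x)
  have hperm : (PySem.List.sorted fin (fun x => x) false).Perm fin :=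
    PySem.List.sorted_perm fin (fun x => x) false
  have hbr : ∀ v, pvBr (PySem.List.sorted fin (fun x => x) false) v
      = fin.countP (fun d => decide (d ≤ v)) := fun v =>
    (pvBr_eq_countP _ v hsort).trans (hperm.countP_eq _)
  by_cases hab : a < b
  · rw [if_pos hab, hbr, hbr,
      pvCountP_le_split fin a b (le_of_lt hab)]
    have hpj : (fun d => decide (a < d ∧ d ≤ b)) (fin.getD j 0) = true := by
      simp only [← hb, decide_eq_true_eq]
      exact ⟨hab, le_refl b⟩
    rw [show ((((fin.countP (fun d => decide (d ≤ a)) + fin.countP (fun d => decide (a < d ∧ d ≤ b)) : Nat) : Int) -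
        (fin.countP (fun d => decide (d ≤ a)) : Int) - 1 ≤ 0)) ↔
        ¬ (2 ≤ fin.countP (fun d => decide (a < d ∧ d ≤ b))) from by push_cast; omega]
    rw [pvTwo_le_countP_iff fin _ j (by omega) hpj]
    simp only [decide_eq_true_eq]
    constructor
    · intro h
      rintro ⟨i, hi, hne, hp⟩
      exact h ⟨i, by omega, hne, hp⟩
    · intro h
      rintro ⟨i, hi, hne, hp⟩
      exact h ⟨i, by omega, hne, hp⟩
  · rw [if_neg hab]
    have hmono : fin.countP (fun d => decide (d ≤ b)) ≤ fin.countP (fun d => decide (d ≤ a)) := by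
      refine List.countP_mono_left ?_
      intro x _ hx
      simp only [decide_eq_true_eq] at hx ⊢
      omega
    refine iff_of_true ?_ ?_
    · rw [hbr, hbr]; omega
    · rintro ⟨i, _, _, h1, h2⟩; omega

theorem pvZip_all (dep fin : List Int) (hlen : dep.length = fin.length) (f : Int × Int → Bool) :
    ((dep.zip fin).all f = true ↔ ∀ j, j < dep.length → f (dep.getD j 0, fin.getD j 0) = true) := by
  rw [List.all_eq_true]
  constructor
  · intro h j hj
    have hjz : j < (dep.zip fin).length := by rw [List.length_zip]; omega
    have hval := h ((dep.zip fin)[j]) (List.getElem_mem hjz)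
    rw [List.getElem_zip] at hval
    rw [List.getD_eq_getElem dep 0 hj, List.getD_eq_getElem fin 0 (by omega)]
    exact hval
  · intro h x hx
    obtain ⟨j, hjz, hEq⟩ := List.getElem_of_mem hx
    rw [← hEq, List.getElem_zip]
    have hj : j < dep.length := by rw [List.length_zip] at hjz; omega
    have hval := h j hj
    rw [List.getD_eq_getElem dep 0 hj, List.getD_eq_getElem fin 0 (by omega)] at hval
    exact hval

theorem pvA_iff (dep fin : List Int) (hlen : dep.length = fin.length) :
    (check_dispo dep fin = true ↔
      ∀ x, x < dep.length → ∀ x2, x2 < dep.length → x ≠ x2 → ¬ pvE dep fin x x2) := by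
  unfold check_dispo
  rw [if_neg (by simp [hlen])]
  rw [Bool.not_eq_true', Bool.eq_false_iff]
  constructor
  · intro h x hx x2 hx2 hne hE
    apply h
    rw [List.any_eq_true]
    refine ⟨x, List.mem_range.mpr hx, ?_⟩
    rw [List.any_eq_true]
    refine ⟨x2, List.mem_range.mpr hx2, ?_⟩
    simp only [Bool.and_eq_true, Bool.or_eq_true, decide_eq_true_eq, ge_iff_le, gt_iff_lt]
    unfold pvE at hE
    exact ⟨hne, hE⟩
  · intro h hX
    rw [List.any_eq_true] at hX
    obtain ⟨x, hxm, hx1⟩ := hX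
    rw [List.any_eq_true] at hx1
    obtain ⟨x2, hx2m, hb⟩ := hx1
    simp only [Bool.and_eq_true, Bool.or_eq_true, decide_eq_true_eq, ge_iff_le, gt_iff_lt] at hb
    refine h x (List.mem_range.mp hxm) x2 (List.mem_range.mp hx2m) hb.1 ?_
    unfold pvE
    exact hb.2

theorem pvB_iff (dep fin : List Int) (hlen : dep.length = fin.length) :
    (check_dispo_alt dep fin = true ↔
      ∀ j, j < dep.length → ¬ ∃ i, i < dep.length ∧ i ≠ j ∧ pvE dep fin i j) := by
  unfold check_dispo_alt
  rw [if_neg (by simp [hlen])]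
  simp only [pvZip_all dep fin hlen, Bool.not_eq_true', Bool.or_eq_false_iff,
    decide_eq_false_iff_not, not_lt, gt_iff_lt]
  constructor
  · intro h j hj
    obtain ⟨h1, h2⟩ := h j hj
    rw [pvCd_iff dep j hj (fin.getD j 0)] at h1
    rw [pvCf_iff dep fin j hlen hj] at h2
    rintro ⟨i, hi, hne, hE⟩
    unfold pvE at hE
    rcases hE with hE | hE
    · exact h1 ⟨i, hi, hne, hE⟩
    · exact h2 ⟨i, hi, hne, hE⟩
  · intro h j hj
    refine ⟨?_, ?_⟩
    · rw [pvCd_iff dep j hj (fin.getD j 0)]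
      rintro ⟨i, hi, hne, hE⟩
      exact h j hj ⟨i, hi, hne, Or.inl hE⟩
    · rw [pvCf_iff dep fin j hlen hj]
      rintro ⟨i, hi, hne, hE⟩
      exact h j hj ⟨i, hi, hne, Or.inr hE⟩

theorem check_dispo_main (dep fin : List Int) : check_dispo dep fin = check_dispo_alt dep fin := by
  by_cases hlen : dep.length = fin.length
  · rw [Bool.eq_iff_iff, pvA_iff dep fin hlen, pvB_iff dep fin hlen]
    constructor
    · intro h j hj
      rintro ⟨i, hi, hne, hE⟩
      exact h i hi j hj hne hE
    · intro h x hx x2 hx2 hne hE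
      exact h x2 hx2 ⟨x, hx, hne, hE⟩
  · unfold check_dispo check_dispo_alt
    rw [if_pos hlen, if_pos hlen]

-- ===== VERDICT (by name: the statement is the Claim_ definition above) =====
theorem check_dispo_spec : Claim_equal_check_dispo := by
  intro dep fin _
  unfold Spec_check_dispo
  exact check_dispo_main dep fin
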